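-- pv_equiv track=rewrite | github.com/sagharborrum/mesh2plan | research/v27d_hierarchical.py | axis_snap_polygon
-- ===== SOURCE A (Python) =====
-- def axis_snap_polygon(poly):
--     if len(poly) < 3: return poly
--     result = [poly[0]]
--     for i in range(1, len(poly)):
--         prev, cur = result[-1], poly[i]
--         if abs(cur[0] - prev[0]) < abs(cur[1] - prev[1]):
--             result.append([prev[0], cur[1]])
--         else:
--             result.append([cur[0], prev[1]])
--     return result
-- ===== SOURCE B (Python) =====
-- def axis_snap_polygon(poly):
--     if len(poly) < 3:
--         return poly
--
--     def walk(x, y, rest):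
--         # x, y: current rectilinear position; emit one snapped point per vertex,
--         # moving along the axis where the next vertex is farther away.
--         if not rest:
--             return []
--         cx, cy = rest[0][0], rest[0][1]
--         if abs(cx - x) < abs(cy - y):
--             return [[x, cy]] + walk(x, cy, rest[1:])
--         return [[cx, y]] + walk(cx, y, rest[1:])
--
--     return [poly[0]] + walk(poly[0][0], poly[0][1], poly[1:])
-- ===== Notes on version B (the rewrite author's own statement) =====
-- stated objective: alternative
-- what changed: Replaces the imperative index loop that appends points to a result list and re-reads result[-1] with a recursive walk over the tail that threads the current position as two scalar coordinates (x, y) and builds the output front-to-back by consing, never touching the output list as state.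
import Mathlib
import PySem

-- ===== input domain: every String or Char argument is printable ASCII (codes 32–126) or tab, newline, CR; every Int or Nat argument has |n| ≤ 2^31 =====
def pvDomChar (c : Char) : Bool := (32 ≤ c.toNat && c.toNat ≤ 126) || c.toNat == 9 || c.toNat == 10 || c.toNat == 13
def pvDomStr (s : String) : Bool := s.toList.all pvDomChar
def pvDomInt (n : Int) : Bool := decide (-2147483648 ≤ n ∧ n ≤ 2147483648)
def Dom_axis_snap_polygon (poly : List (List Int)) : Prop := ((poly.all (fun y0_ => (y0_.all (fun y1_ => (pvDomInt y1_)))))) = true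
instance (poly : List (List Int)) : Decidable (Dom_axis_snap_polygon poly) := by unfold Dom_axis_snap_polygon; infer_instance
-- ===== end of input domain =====

-- B replaces A's append-and-reread-result[-1] loop with a recursive walk threading the
-- position as two scalar coordinates and consing the output (alternative decomposition;
-- return value only).

-- ===== PORT A =====
def axis_snap_polygon (poly : List (List Int)) : List (List Int) :=
  if poly.length < 3 then poly
  else
    (PySem.List.pyRange 1 (PySem.List.len poly) 1).foldl
      (fun result i =>
        let prev := PySem.List.pyGetD result (-1) []
        let cur := PySem.List.pyGetD poly i []
        if |PySem.List.pyGetD cur 0 0 - PySem.List.pyGetD prev 0 0| <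
           |PySem.List.pyGetD cur 1 0 - PySem.List.pyGetD prev 1 0| then
          result ++ [[PySem.List.pyGetD prev 0 0, PySem.List.pyGetD cur 1 0]]
        else
          result ++ [[PySem.List.pyGetD cur 0 0, PySem.List.pyGetD prev 1 0]])
      [PySem.List.pyGetD poly 0 []]

-- ===== PORT B =====
def pvWalk (x y : Int) (rest : List (List Int)) : List (List Int) :=
  match rest with
  | [] => []
  | c :: rs =>
    let cx := PySem.List.pyGetD c 0 0
    let cy := PySem.List.pyGetD c 1 0
    if |cx - x| < |cy - y| then [x, cy] :: pvWalk x cy rs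
    else [cx, y] :: pvWalk cx y rs

def axis_snap_polygon_alt (poly : List (List Int)) : List (List Int) :=
  if poly.length < 3 then poly
  else
    match poly with
    | [] => []
    | p0 :: rest =>
      p0 :: pvWalk (PySem.List.pyGetD p0 0 0) (PySem.List.pyGetD p0 1 0) rest

-- ===== PRECONDITION & SPEC =====
-- Pre_ excludes exactly the inputs on which Python A raises IndexError: a polygon with
-- at least 3 vertices containing a vertex with fewer than 2 coordinates.
def Pre_axis_snap_polygon (poly : List (List Int)) : Prop :=
  poly.length < 3 ∨ ∀ p ∈ poly, 2 ≤ p.length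
instance (poly : List (List Int)) : Decidable (Pre_axis_snap_polygon poly) := by
  unfold Pre_axis_snap_polygon; infer_instance

def pvWitness_axis_snap_polygon : List (List Int) := [[0, 0], [3, 1], [4, 5]]

def Spec_axis_snap_polygon (poly : List (List Int)) (out : List (List Int)) : Prop :=
  out = axis_snap_polygon_alt poly
instance (poly : List (List Int)) (out : List (List Int)) : Decidable (Spec_axis_snap_polygon poly out) := by
  unfold Spec_axis_snap_polygon; infer_instance

-- ===== CLAIM (what is proved, stated in full; the proofs are below) =====
def Claim_equal_axis_snap_polygon : Prop := ∀ (poly : List (List Int)), Dom_axis_snap_polygon poly → Pre_axis_snap_polygon poly → Spec_axis_snap_polygon poly (axis_snap_polygon poly)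

-- ===== LEMMAS AND PROOFS =====

-- A's loop body, named so the fold lemmas apply (defeq to the lambda in the port, with
-- poly[i] already fetched)
def pvStepA (result : List (List Int)) (cur : List Int) : List (List Int) :=
  let prev := PySem.List.pyGetD result (-1) []
  if |PySem.List.pyGetD cur 0 0 - PySem.List.pyGetD prev 0 0| <
     |PySem.List.pyGetD cur 1 0 - PySem.List.pyGetD prev 1 0| then
    result ++ [[PySem.List.pyGetD prev 0 0, PySem.List.pyGetD cur 1 0]]
  else
    result ++ [[PySem.List.pyGetD cur 0 0, PySem.List.pyGetD prev 1 0]]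

-- invariant: A's fold over the remaining vertices, with last appended point having
-- coordinates (x, y), appends exactly B's recursive walk from (x, y)
theorem foldl_eq_walk (rest : List (List Int)) (acc : List (List Int)) (prev : List Int)
    (x y : Int)
    (hacc : PySem.List.pyGetD acc (-1) [] = prev)
    (hx : PySem.List.pyGetD prev 0 0 = x)
    (hy : PySem.List.pyGetD prev 1 0 = y) :
    rest.foldl pvStepA acc = acc ++ pvWalk x y rest := by
  induction rest generalizing acc prev x y with
  | nil => simp [pvWalk]
  | cons c rs ih =>
    rw [List.foldl_cons]
    simp only [pvStepA, hacc, hx, hy, pvWalk]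
    by_cases hc : |PySem.List.pyGetD c 0 0 - x| < |PySem.List.pyGetD c 1 0 - y|
    · simp only [hc, if_pos]
      rw [ih (acc ++ [[x, PySem.List.pyGetD c 1 0]]) [x, PySem.List.pyGetD c 1 0]
            x (PySem.List.pyGetD c 1 0)
            (PySem.List.pyGetD_neg_one_append_singleton acc _ [])
            (by simp [PySem.List.pyGetD, PySem.List.pyGet?, PySem.List.pyIdx?]) (by simp [PySem.List.pyGetD, PySem.List.pyGet?, PySem.List.pyIdx?])]
      simp
    · simp only [hc, if_false]
      rw [ih (acc ++ [[PySem.List.pyGetD c 0 0, y]]) [PySem.List.pyGetD c 0 0, y]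
            (PySem.List.pyGetD c 0 0) y
            (PySem.List.pyGetD_neg_one_append_singleton acc _ [])
            (by simp [PySem.List.pyGetD, PySem.List.pyGet?, PySem.List.pyIdx?]) (by simp [PySem.List.pyGetD, PySem.List.pyGet?, PySem.List.pyIdx?])]
      simp

-- ===== VERDICT (by name: the statement is the Claim_ definition above) =====
theorem axis_snap_polygon_spec : Claim_equal_axis_snap_polygon := by
  intro poly _ _
  unfold Spec_axis_snap_polygon axis_snap_polygon axis_snap_polygon_alt
  by_cases h : poly.length < 3
  · simp [h]
  · simp only [h, if_false]
    match poly, h with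
    | p0 :: rest, h =>
      refine Eq.trans
        (PySem.List.foldl_pyRange_pyGetD (p0 :: rest) [] pvStepA
          [PySem.List.pyGetD (p0 :: rest) 0 []] (by norm_num)) ?_
      simp only [Int.toNat_one, List.drop_succ_cons, List.drop_zero, PySem.List.pyGetD_zero_cons]
      rw [foldl_eq_walk rest [p0] p0 (PySem.List.pyGetD p0 0 0) (PySem.List.pyGetD p0 1 0)
          (PySem.List.pyGetD_neg_one_append_singleton [] p0 []) rfl rfl]
      rfl
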